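-- pv_equiv track=rewrite | github.com/Victor-Smirnoff/my_codesignal_solutions_Python | Intro/almostIncreasingSequence.py | solution
-- ===== SOURCE A (Python) =====
-- def del_more(sequence):
--     for i in range(1, len(sequence)):
--         if sequence[i - 1] < sequence[i]:
--             continue
--         del sequence[i - 1]
--         break
--     return sequence
--
-- def del_less(sequence):
--     for i in range(1, len(sequence)):
--         if sequence[i - 1] < sequence[i]:
--             continue
--         del sequence[i]
--         break
--     return sequence
--
-- def solution(sequence):
--     s1 = sequence[:]
--     s2 = sequence[:]
--     sequence1 = del_more(s1)
--     sequence2 = del_less(s2)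
--
--     flag1 = True
--     for i in range(1, len(sequence1)):
--         if sequence1[i - 1] >= sequence1[i]:
--             flag1 = False
--             break
--         continue
--
--     flag2 = True
--     for i in range(1, len(sequence2)):
--         if sequence2[i - 1] >= sequence2[i]:
--             flag2 = False
--             break
--         continue
--
--     return True if flag1 or flag2 else False
-- ===== SOURCE B (Python) =====
-- def solution(sequence):
--     n = len(sequence)
--     count = 0
--     for i in range(1, n):
--         if sequence[i - 1] >= sequence[i]:
--             count += 1
--             if count > 1:
--                 return False
--             if (i >= 2 and sequence[i - 2] >= sequence[i]) and (i + 1 < n and sequence[i - 1] >= sequence[i + 1]):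
--                 return False
--     return True
-- ===== Notes on version B (the rewrite author's own statement) =====
-- stated objective: simpler
-- what changed: Replaced the two-copy delete-and-recheck scheme (copy the list twice, delete the left/right neighbour at the first violation, re-scan each copy) by a single forward pass over the original list that counts violations and tests local removability at each one.
import Mathlib
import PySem

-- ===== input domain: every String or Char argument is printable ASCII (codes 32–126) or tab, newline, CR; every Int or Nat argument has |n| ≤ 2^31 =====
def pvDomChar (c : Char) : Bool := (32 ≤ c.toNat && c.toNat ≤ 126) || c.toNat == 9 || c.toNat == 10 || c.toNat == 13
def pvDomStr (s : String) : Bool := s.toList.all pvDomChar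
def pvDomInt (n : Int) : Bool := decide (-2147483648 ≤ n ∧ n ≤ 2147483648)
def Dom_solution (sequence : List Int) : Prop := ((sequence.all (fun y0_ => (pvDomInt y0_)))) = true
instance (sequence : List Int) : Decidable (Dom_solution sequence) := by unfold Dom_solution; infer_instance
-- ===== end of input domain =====

-- B replaces A's two-copy delete-and-recheck scheme with one forward pass keeping a violation counter (simpler).
-- A only mutates private copies of its argument, so there is no caller-visible side effect.

-- ===== PORT A =====
-- del_more: for i in range(1, len): if s[i-1] < s[i]: continue; del s[i-1]; break
def delMoreAux (s : List Int) (i : Nat) : List Int :=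
  if i < s.length then
    if s.getD (i - 1) 0 < s.getD i 0 then delMoreAux s (i + 1)
    else s.eraseIdx (i - 1)
  else s
termination_by s.length - i

def del_more (s : List Int) : List Int := delMoreAux s 1

-- del_less: same scan, but deletes s[i]
def delLessAux (s : List Int) (i : Nat) : List Int :=
  if i < s.length then
    if s.getD (i - 1) 0 < s.getD i 0 then delLessAux s (i + 1)
    else s.eraseIdx i
  else s
termination_by s.length - i

def del_less (s : List Int) : List Int := delLessAux s 1

-- the flag loop of solution: scan from index i, False at the first s[i-1] >= s[i]
def flagAux (s : List Int) (i : Nat) : Bool :=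
  if i < s.length then
    if s.getD i 0 ≤ s.getD (i - 1) 0 then false
    else flagAux s (i + 1)
  else true
termination_by s.length - i

def solution (sequence : List Int) : Bool :=
  let s1 := sequence
  let s2 := sequence
  let sequence1 := del_more s1
  let sequence2 := del_less s2
  let flag1 := flagAux sequence1 1
  let flag2 := flagAux sequence2 1
  if flag1 || flag2 then true else false

-- ===== PORT B =====
-- single forward pass with a violation counter (Source B)
def altAux (s : List Int) (i : Nat) (count : Nat) : Bool :=
  if i < s.length then
    if s.getD (i - 1) 0 ≥ s.getD i 0 then
      if count + 1 > 1 then false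
      else if (2 ≤ i ∧ s.getD (i - 2) 0 ≥ s.getD i 0) ∧
              (i + 1 < s.length ∧ s.getD (i - 1) 0 ≥ s.getD (i + 1) 0) then false
      else altAux s (i + 1) (count + 1)
    else altAux s (i + 1) count
  else true
termination_by s.length - i

def solution_alt (sequence : List Int) : Bool := altAux sequence 1 0

-- ===== PRECONDITION & SPEC =====
def Spec_solution (sequence : List Int) (out : Bool) : Prop := out = solution_alt sequence
instance (sequence : List Int) (out : Bool) : Decidable (Spec_solution sequence out) := by unfold Spec_solution; infer_instance

-- ===== CLAIM (what is proved, stated in full; the proofs are below) =====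
def Claim_equal_solution : Prop := ∀ (sequence : List Int), Dom_solution sequence → Spec_solution sequence (solution sequence)

-- ===== LEMMAS AND PROOFS =====

-- IncFromP s i: every adjacent pair (k-1, k) with i ≤ k < len is strictly increasing (proof-side helper)
def IncFromP (s : List Int) (i : Nat) : Prop :=
  ∀ k, i ≤ k → k < s.length → s.getD (k - 1) 0 < s.getD k 0

theorem getD_eraseIdx_zero (s : List Int) (j k : Nat) :
    (s.eraseIdx j).getD k 0 = if k < j then s.getD k 0 else s.getD (k + 1) 0 := by
  simp [List.getD_eq_getElem?_getD, List.getElem?_eraseIdx]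
  split <;> rfl

theorem flagAux_iff (s : List Int) :
    ∀ n i, s.length - i ≤ n → 1 ≤ i → (flagAux s i = true ↔ IncFromP s i) := by
  intro n
  induction n with
  | zero =>
    intro i hn hi
    have hlen : s.length ≤ i := by omega
    rw [flagAux]
    simp only [Nat.lt_iff_add_one_le]
    constructor
    · intro _ k hk hk'
      omega
    · intro _
      simp [show ¬ (i < s.length) by omega]
  | succ n ih =>
    intro i hn hi
    by_cases hlt : i < s.length
    · rw [flagAux]
      simp only [hlt, if_pos]
      by_cases hv : s.getD i 0 ≤ s.getD (i - 1) 0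
      · simp only [hv, if_pos]
        constructor
        · intro h; exact absurd h (by simp)
        · intro h
          have := h i (le_refl i) hlt
          omega
      · simp only [hv, if_neg, not_false_iff]
        rw [ih (i + 1) (by omega) (by omega)]
        constructor
        · intro h k hk hk'
          rcases Nat.eq_or_lt_of_le hk with rfl | hk2
          · omega
          · exact h k (by omega) hk'
        · intro h k hk hk'
          exact h k (by omega) hk'
    · rw [flagAux]
      simp only [hlt, if_neg, not_false_iff]
      constructor
      · intro _ k hk hk'
        omega
      · intro _
        trivial

theorem flagAux_iff' (s : List Int) (i : Nat) (hi1 : 1 ≤ i) :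
    flagAux s i = true ↔ IncFromP s i :=
  flagAux_iff s (s.length - i) i (le_refl _) hi1

theorem altAux_one_eq_flagAux (s : List Int) :
    ∀ n i, s.length - i ≤ n → altAux s i 1 = flagAux s i := by
  intro n
  induction n with
  | zero =>
    intro i hn
    rw [altAux, flagAux]
    simp [show ¬ (i < s.length) by omega]
  | succ n ih =>
    intro i hn
    rw [altAux, flagAux]
    by_cases hil : i < s.length
    · rw [if_pos hil, if_pos hil]
      by_cases hv : s.getD i 0 ≤ s.getD (i - 1) 0
      · rw [if_pos (show s.getD (i - 1) 0 ≥ s.getD i 0 from hv), if_pos hv,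
          if_pos (show 1 + 1 > 1 by omega)]
      · rw [if_neg (show ¬ s.getD (i - 1) 0 ≥ s.getD i 0 from hv), if_neg hv]
        exact ih (i + 1) (by omega)
    · rw [if_neg hil, if_neg hil]

-- IncFromP step unfolding
theorem incFromP_step (s : List Int) (i : Nat) (hi : 1 ≤ i) :
    IncFromP s i ↔ ((i < s.length → s.getD (i - 1) 0 < s.getD i 0) ∧ IncFromP s (i + 1)) := by
  constructor
  · intro h
    exact ⟨fun hl => h i (le_refl i) hl, fun k hk hk' => h k (by omega) hk'⟩
  · rintro ⟨h1, h2⟩ k hk hk'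
    rcases Nat.eq_or_lt_of_le hk with rfl | hk2
    · exact h1 hk'
    · exact h2 k (by omega) hk'

-- deleting the left neighbour of the first violation, characterised on s
theorem incFromP_erase_left (s : List Int) (i : Nat) (hi : 1 ≤ i) (hil : i < s.length)
    (hpre : ∀ k, 1 ≤ k → k < i → k < s.length → s.getD (k - 1) 0 < s.getD k 0) :
    IncFromP (s.eraseIdx (i - 1)) 1 ↔
      ((2 ≤ i → s.getD (i - 2) 0 < s.getD i 0) ∧ IncFromP s (i + 1)) := by
  have hlen : (s.eraseIdx (i - 1)).length = s.length - 1 := by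
    rw [List.length_eraseIdx]; simp [show i - 1 < s.length by omega]
  constructor
  · intro h
    constructor
    · intro h2
      have := h (i - 1) (by omega) (by omega)
      rw [getD_eraseIdx_zero, getD_eraseIdx_zero] at this
      rw [if_pos (by omega : i - 1 - 1 < i - 1), if_neg (by omega : ¬ (i - 1 < i - 1))] at this
      have e1 : i - 1 - 1 = i - 2 := by omega
      have e2 : i - 1 + 1 = i := by omega
      rw [e1, e2] at this
      exact this
    · intro k hk hk'
      have := h (k - 1) (by omega) (by omega)
      rw [getD_eraseIdx_zero, getD_eraseIdx_zero] at this
      rw [if_neg (by omega : ¬ (k - 1 - 1 < i - 1)), if_neg (by omega : ¬ (k - 1 < i - 1))] at this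
      have e1 : k - 1 - 1 + 1 = k - 1 := by omega
      have e2 : k - 1 + 1 = k := by omega
      rw [e1, e2] at this
      exact this
  · rintro ⟨h1, h2⟩ k hk hk'
    rw [getD_eraseIdx_zero, getD_eraseIdx_zero]
    rw [hlen] at hk'
    by_cases hc1 : k < i - 1
    · rw [if_pos (by omega), if_pos hc1]
      exact hpre k hk (by omega) (by omega)
    · by_cases hc2 : k = i - 1
      · subst hc2
        rw [if_pos (by omega), if_neg (by omega)]
        have e1 : i - 1 - 1 = i - 2 := by omega
        have e2 : i - 1 + 1 = i := by omega
        rw [e1, e2]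
        exact h1 (by omega)
      · rw [if_neg (by omega), if_neg (by omega)]
        have e2 : k - 1 + 1 = k := by omega
        have := h2 (k + 1) (by omega) (by omega)
        have e3 : k + 1 - 1 = k := by omega
        rw [e3] at this
        rw [e2]
        exact this

-- deleting the right element of the first violation, characterised on s
theorem incFromP_erase_right (s : List Int) (i : Nat) (hi : 1 ≤ i) (hil : i < s.length)
    (hpre : ∀ k, 1 ≤ k → k < i → k < s.length → s.getD (k - 1) 0 < s.getD k 0) :
    IncFromP (s.eraseIdx i) 1 ↔
      ((i + 1 < s.length → s.getD (i - 1) 0 < s.getD (i + 1) 0) ∧ IncFromP s (i + 2)) := by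
  have hlen : (s.eraseIdx i).length = s.length - 1 := by
    rw [List.length_eraseIdx]; simp [hil]
  constructor
  · intro h
    constructor
    · intro h2
      have := h i (by omega) (by omega)
      rw [getD_eraseIdx_zero, getD_eraseIdx_zero] at this
      rw [if_pos (by omega : i - 1 < i), if_neg (by omega : ¬ (i < i))] at this
      exact this
    · intro k hk hk'
      have := h (k - 1) (by omega) (by omega)
      rw [getD_eraseIdx_zero, getD_eraseIdx_zero] at this
      rw [if_neg (by omega : ¬ (k - 1 - 1 < i)), if_neg (by omega : ¬ (k - 1 < i))] at this
      have e1 : k - 1 - 1 + 1 = k - 1 := by omega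
      have e2 : k - 1 + 1 = k := by omega
      rw [e1, e2] at this
      exact this
  · rintro ⟨h1, h2⟩ k hk hk'
    rw [getD_eraseIdx_zero, getD_eraseIdx_zero]
    rw [hlen] at hk'
    by_cases hc1 : k < i
    · rw [if_pos (by omega), if_pos hc1]
      exact hpre k hk (by omega) (by omega)
    · by_cases hc2 : k = i
      · subst hc2
        rw [if_pos (by omega), if_neg (by omega)]
        exact h1 (by omega)
      · rw [if_neg (by omega), if_neg (by omega)]
        have e2 : k - 1 + 1 = k := by omega
        have := h2 (k + 1) (by omega) (by omega)
        have e3 : k + 1 - 1 = k := by omega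
        rw [e3] at this
        rw [e2]
        exact this

-- main simulation lemma: from any scan position i with an increasing prefix, A's
-- two-deletion check equals B's counter pass
theorem main_lemma (s : List Int) :
    ∀ n i, s.length - i ≤ n → 1 ≤ i →
      (∀ k, 1 ≤ k → k < i → k < s.length → s.getD (k - 1) 0 < s.getD k 0) →
      ((flagAux (delMoreAux s i) 1 || flagAux (delLessAux s i) 1) = altAux s i 0) := by
  intro n
  induction n with
  | zero =>
    intro i hn hi hpre
    have hlen : s.length ≤ i := by omega
    rw [delMoreAux, delLessAux, altAux]
    simp only [show ¬ (i < s.length) by omega, if_neg, not_false_iff]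
    have : flagAux s 1 = true := by
      rw [flagAux_iff' s 1 (le_refl 1)]
      intro k hk hk'
      exact hpre k hk (by omega) hk'
    simp [this]
  | succ n ih =>
    intro i hn hi hpre
    by_cases hil : i < s.length
    · rw [delMoreAux, delLessAux, altAux]
      rw [if_pos hil, if_pos hil, if_pos hil]
      by_cases hlt : s.getD (i - 1) 0 < s.getD i 0
      · -- no violation at i: all three loops advance
        rw [if_pos hlt, if_pos hlt,
          if_neg (show ¬ s.getD (i - 1) 0 ≥ s.getD i 0 from not_le.mpr hlt)]
        apply ih (i + 1) (by omega) (by omega)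
        intro k hk hk' hk''
        rcases Nat.eq_or_lt_of_le (by omega : k ≤ i) with rfl | hk2
        · exact hlt
        · exact hpre k hk (by omega) hk''
      · -- violation at i
        have hv : s.getD i 0 ≤ s.getD (i - 1) 0 := by omega
        rw [if_neg hlt, if_neg hlt,
          if_pos (show s.getD (i - 1) 0 ≥ s.getD i 0 from hv),
          if_neg (show ¬ ((0 : Nat) + 1 > 1) by omega)]
        by_cases hb : (2 ≤ i ∧ s.getD (i - 2) 0 ≥ s.getD i 0) ∧
            (i + 1 < s.length ∧ s.getD (i - 1) 0 ≥ s.getD (i + 1) 0)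
        · -- both neighbours block the removal: A's two rechecks both fail
          rw [if_pos hb]
          have h1 : flagAux (s.eraseIdx (i - 1)) 1 = false := by
            rw [Bool.eq_false_iff]
            intro h
            rw [flagAux_iff' _ 1 (le_refl 1),
              incFromP_erase_left s i hi hil hpre] at h
            have := h.1 hb.1.1
            have := hb.1.2
            omega
          have h2 : flagAux (s.eraseIdx i) 1 = false := by
            rw [Bool.eq_false_iff]
            intro h
            rw [flagAux_iff' _ 1 (le_refl 1),
              incFromP_erase_right s i hi hil hpre] at h
            have := h.1 hb.2.1
            have := hb.2.2
            omega
          rw [h1, h2]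
          rfl
        · -- removal is locally possible: compare with the remaining scan
          rw [if_neg hb]
          rw [altAux_one_eq_flagAux s (s.length - (i + 1)) (i + 1) (le_refl _)]
          rw [Bool.eq_iff_iff]
          simp only [Bool.or_eq_true]
          rw [flagAux_iff' _ 1 (le_refl 1), flagAux_iff' _ 1 (le_refl 1),
            flagAux_iff' _ (i + 1) (by omega),
            incFromP_erase_left s i hi hil hpre,
            incFromP_erase_right s i hi hil hpre]
          have hstep := incFromP_step s (i + 1) (by omega)
          rw [show i + 1 - 1 = i from rfl] at hstep
          constructor
          · rintro (⟨_, hQ⟩ | ⟨hR, hP⟩)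
            · exact hQ
            · rw [hstep]
              refine ⟨fun h => ?_, hP⟩
              have := hR h
              omega
          · intro hQ
            by_cases hL : (2 ≤ i → s.getD (i - 2) 0 < s.getD i 0)
            · exact Or.inl ⟨hL, hQ⟩
            · push Not at hL
              have hR : i + 1 < s.length → s.getD (i - 1) 0 < s.getD (i + 1) 0 := by
                intro hl
                by_contra hc
                exact hb ⟨⟨hL.1, by omega⟩, ⟨hl, by omega⟩⟩
              rw [hstep] at hQ
              exact Or.inr ⟨hR, hQ.2⟩
    · -- i ≥ length: loops end; altAux returns true and both deletions are no-ops
      rw [delMoreAux, delLessAux, altAux]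
      simp only [show ¬ (i < s.length) by omega, if_neg, not_false_iff]
      have : flagAux s 1 = true := by
        rw [flagAux_iff' s 1 (le_refl 1)]
        intro k hk hk'
        exact hpre k hk (by omega) hk'
      simp [this]

-- ===== VERDICT (by name: the statement is the Claim_ definition above) =====
theorem solution_spec : Claim_equal_solution := by
  unfold Claim_equal_solution Spec_solution
  intro s _
  show solution s = solution_alt s
  unfold solution solution_alt del_more del_less
  simp only []
  have h := main_lemma s s.length 1 (by omega) (le_refl 1) (by intro k hk hk' _; omega)
  rw [← h]
  cases (flagAux (delMoreAux s 1) 1 || flagAux (delLessAux s 1) 1) <;> rfl
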